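-- pv_equiv track=rewrite | github.com/joenorton/sans | sans/sans/runtime.py | _compute_by_flags
-- ===== SOURCE A (Python) =====
-- from typing import Any, Dict, Iterable, List, Optional
--
-- def _compute_by_flags(by_vars: list[str], prev_key: Optional[tuple[Any, ...]], curr_key: tuple[Any, ...], next_key: Optional[tuple[Any, ...]]) -> dict[str, bool]:
--     flags: dict[str, bool] = {}
--     for idx, var in enumerate(by_vars):
--         first = prev_key is None or prev_key[:idx + 1] != curr_key[:idx + 1]
--         last = next_key is None or next_key[:idx + 1] != curr_key[:idx + 1]
--         flags[f"first.{var}"] = first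
--         flags[f"last.{var}"] = last
--     return flags
-- ===== SOURCE B (Python) =====
-- from typing import Any, Optional
--
--
-- def _compute_by_flags(by_vars: list[str], prev_key: Optional[tuple[Any, ...]], curr_key: tuple[Any, ...], next_key: Optional[tuple[Any, ...]]) -> dict[str, bool]:
--     # Prefix (in)equality against curr_key is monotone in the prefix length, so
--     # compute a single boundary threshold per neighbour once, then fill flags in
--     # one linear pass: flag at position i is True iff i >= threshold.
--     def threshold(key):
--         if key is None:
--             return 0          # every level is a boundary
--         if key == curr_key:
--             return None       # no level is a boundary
--         m = 0
--         for x, y in zip(key, curr_key):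
--             if x != y:
--                 break
--             m += 1
--         return m              # first diverging prefix length is m + 1
--     tp = threshold(prev_key)
--     tn = threshold(next_key)
--     flags: dict[str, bool] = {}
--     for i, var in enumerate(by_vars):
--         flags[f"first.{var}"] = tp is not None and i >= tp
--         flags[f"last.{var}"] = tn is not None and i >= tn
--     return flags
-- ===== Notes on version B (the rewrite author's own statement) =====
-- stated objective: faster
-- what changed: B replaces A's per-variable prefix-slice comparisons with a single common-prefix-length (threshold) computation per neighbour key, then fills all flags in one linear pass with an index comparison.
import Mathlib
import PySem

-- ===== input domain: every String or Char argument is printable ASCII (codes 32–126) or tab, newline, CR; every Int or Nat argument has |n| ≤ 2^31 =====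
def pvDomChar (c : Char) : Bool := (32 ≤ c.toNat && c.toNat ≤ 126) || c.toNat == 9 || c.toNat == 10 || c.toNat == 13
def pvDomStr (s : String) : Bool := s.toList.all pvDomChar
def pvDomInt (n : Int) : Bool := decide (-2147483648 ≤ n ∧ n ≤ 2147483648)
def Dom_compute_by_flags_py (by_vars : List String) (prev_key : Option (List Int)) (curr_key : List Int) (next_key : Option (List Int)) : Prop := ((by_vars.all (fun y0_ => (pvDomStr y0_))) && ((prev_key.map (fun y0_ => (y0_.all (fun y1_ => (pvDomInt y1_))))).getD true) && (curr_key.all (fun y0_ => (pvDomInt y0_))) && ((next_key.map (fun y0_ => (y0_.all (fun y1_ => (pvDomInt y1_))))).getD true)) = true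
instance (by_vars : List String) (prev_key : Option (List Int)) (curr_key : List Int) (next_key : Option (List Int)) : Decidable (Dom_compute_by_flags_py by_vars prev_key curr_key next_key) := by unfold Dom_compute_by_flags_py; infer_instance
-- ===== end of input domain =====

-- B computes one prefix-divergence threshold per neighbour key and fills the flags in a
-- single linear pass, instead of A's per-level prefix-slice comparisons (faster; same values).

-- ===== PORT A =====
def compute_by_flags_py (by_vars : List String) (prev_key : Option (List Int)) (curr_key : List Int) (next_key : Option (List Int)) : List (String × Bool) :=
  ((PySem.List.enumerate by_vars 0).foldl (fun (flags : PySem.Dict String Bool) p =>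
    let idx := p.1
    let var := p.2
    let first : Bool :=
      match prev_key with
      | none => true
      | some pk => decide (PySem.List.slice pk none (some (idx + 1)) ≠ PySem.List.slice curr_key none (some (idx + 1)))
    let last : Bool :=
      match next_key with
      | none => true
      | some nk => decide (PySem.List.slice nk none (some (idx + 1)) ≠ PySem.List.slice curr_key none (some (idx + 1)))
    ((flags.insert ("first." ++ var) first).insert ("last." ++ var) last))
    PySem.Dict.empty).items

-- ===== PORT B =====
-- length of the common prefix (the for-loop over zip(key, curr_key) in Source B)
def pvLcp : List Int → List Int → Nat
  | x :: xs, y :: ys => if x = y then pvLcp xs ys + 1 else 0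
  | _, _ => 0

-- Source B's threshold(key): none = never a boundary, some m = boundary from level m on
def pvThreshold (key? : Option (List Int)) (curr : List Int) : Option Nat :=
  match key? with
  | none => some 0
  | some k => if k = curr then none else some (pvLcp k curr)

def compute_by_flags_py_alt (by_vars : List String) (prev_key : Option (List Int)) (curr_key : List Int) (next_key : Option (List Int)) : List (String × Bool) :=
  let tp := pvThreshold prev_key curr_key
  let tn := pvThreshold next_key curr_key
  ((PySem.List.enumerate by_vars 0).foldl (fun (flags : PySem.Dict String Bool) p =>
    let i := p.1
    let var := p.2
    let first : Bool := match tp with | none => false | some t => decide ((t : Int) ≤ i)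
    let last  : Bool := match tn with | none => false | some t => decide ((t : Int) ≤ i)
    ((flags.insert ("first." ++ var) first).insert ("last." ++ var) last))
    PySem.Dict.empty).items

-- ===== PRECONDITION & SPEC =====
def Spec_compute_by_flags_py (by_vars : List String) (prev_key : Option (List Int)) (curr_key : List Int) (next_key : Option (List Int)) (out : List (String × Bool)) : Prop := out = compute_by_flags_py_alt by_vars prev_key curr_key next_key
instance (by_vars : List String) (prev_key : Option (List Int)) (curr_key : List Int) (next_key : Option (List Int)) (out : List (String × Bool)) : Decidable (Spec_compute_by_flags_py by_vars prev_key curr_key next_key out) := by unfold Spec_compute_by_flags_py; infer_instance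

-- ===== CLAIM (what is proved, stated in full; the proofs are below) =====
def Claim_equal_compute_by_flags_py : Prop := ∀ (by_vars : List String) (prev_key : Option (List Int)) (curr_key : List Int) (next_key : Option (List Int)), Dom_compute_by_flags_py by_vars prev_key curr_key next_key → Spec_compute_by_flags_py by_vars prev_key curr_key next_key (compute_by_flags_py by_vars prev_key curr_key next_key)

-- ===== LEMMAS AND PROOFS =====

-- ===== VERDICT (by name: the statement is the Claim_ definition above) =====
-- take-prefix equality is characterised by the common-prefix length
lemma take_eq_iff_lcp (a b : List Int) (n : Nat) :
    List.take n a = List.take n b ↔ (a = b ∨ n ≤ pvLcp a b) := by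
  induction a generalizing b n with
  | nil =>
    cases b with
    | nil => simp
    | cons y ys =>
      cases n with
      | zero => simp
      | succ m => simp [pvLcp]
  | cons x xs ih =>
    cases b with
    | nil =>
      cases n with
      | zero => simp [pvLcp]
      | succ m => simp [pvLcp]
    | cons y ys =>
      cases n with
      | zero => simp
      | succ m =>
        by_cases hxy : x = y
        · subst hxy
          simp [pvLcp, ih ys m]
        · simp [pvLcp, hxy]

-- the per-level flag A computes equals the threshold test B computes
lemma flag_eq (key? : Option (List Int)) (curr : List Int) (k : Nat) :
    (match key? with
      | none => true
      | some pk => decide (PySem.List.slice pk none (some ((k : Int) + 1)) ≠ PySem.List.slice curr none (some ((k : Int) + 1)))) =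
    (match pvThreshold key? curr with
      | none => false
      | some t => decide ((t : Int) ≤ (k : Nat))) := by
  cases key? with
  | none => simp [pvThreshold]
  | some pk =>
    dsimp only
    have hcast : ((k : Int) + 1) = ((k + 1 : Nat) : Int) := by push_cast; ring
    rw [hcast, PySem.List.slice_to_natCast, PySem.List.slice_to_natCast]
    unfold pvThreshold
    by_cases hpc : pk = curr
    · simp [hpc]
    · simp only [hpc, if_false]
      have := take_eq_iff_lcp pk curr (k + 1)
      simp only [hpc, false_or] at this
      by_cases h : k + 1 ≤ pvLcp pk curr
      · simp [this.mpr h]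
        omega
      · have hne : List.take (k + 1) pk ≠ List.take (k + 1) curr := fun he => h (this.mp he)
        simp [hne]
        omega

-- ===== VERDICT (by name: the statement is the Claim_ definition above) =====
theorem compute_by_flags_py_spec : Claim_equal_compute_by_flags_py := by
  intro by_vars prev_key curr_key next_key _
  unfold Spec_compute_by_flags_py compute_by_flags_py compute_by_flags_py_alt
  congr 1
  apply PySem.List.foldl_congr_mem
  intro acc p hp
  rcases (PySem.List.mem_enumerate_iff _ _ _).mp hp with ⟨k, hk, rfl⟩
  simp only [Int.zero_add]
  have h1 := flag_eq prev_key curr_key k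
  have h2 := flag_eq next_key curr_key k
  simp only at h1 h2 ⊢
  rw [h1, h2]
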